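-- pv_equiv track=rewrite | github.com/ddadaal/Homework | Leetcode/32.py | stringAdd
-- ===== SOURCE A (Python) =====
-- def reverseString(str):
--     return str[::-1]
--
-- def stringAdd(num1, num2):
--     add1 = reverseString(num1)
--     add2 = reverseString(num2)
--
--     # add 0
--
--     if len(add1) < len(add2):
--         add1 += "0"*(len(add2)-len(add1))
--     elif len(add2) < len(add1):
--         add2 += "0"*(len(add1)-len(add2))
--
--     carry = 0
--     result = ""
--     for i in range(0, len(add1)):
--         digit1=ord(add1[i])-ord("0")
--         digit2=ord(add2[i])-ord("0")
--         r=digit1+digit2+carry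
--         carry = r // 10
--         result += str(r % 10)
--
--     if carry == 1:
--         result += "1"
--     return reverseString(result)
-- ===== SOURCE B (Python) =====
-- def stringAdd(num1, num2):
--     # Evaluate each string as an integer (Horner), add once with big-int
--     # arithmetic, then re-digitize the sum to the padded width.
--     v1 = 0
--     for c in num1:
--         v1 = 10 * v1 + (ord(c) - 48)
--     v2 = 0
--     for c in num2:
--         v2 = 10 * v2 + (ord(c) - 48)
--     width = max(len(num1), len(num2))
--     carry, n = divmod(v1 + v2, 10 ** width)
--     out = []
--     for _ in range(width):
--         n, d = divmod(n, 10)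
--         out.append(str(d))
--     if carry == 1:
--         out.append("1")
--     return "".join(reversed(out))
-- ===== Notes on version B (the rewrite author's own statement) =====
-- stated objective: alternative
-- what changed: B replaces A's reverse/pad/column-by-column carry loop with integer arithmetic: each string is evaluated to an integer by Horner's rule, the two integers are added once, and the digits of the sum modulo 10^width are extracted back by repeated divmod, with the quotient supplying the final carry digit.
import Mathlib
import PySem

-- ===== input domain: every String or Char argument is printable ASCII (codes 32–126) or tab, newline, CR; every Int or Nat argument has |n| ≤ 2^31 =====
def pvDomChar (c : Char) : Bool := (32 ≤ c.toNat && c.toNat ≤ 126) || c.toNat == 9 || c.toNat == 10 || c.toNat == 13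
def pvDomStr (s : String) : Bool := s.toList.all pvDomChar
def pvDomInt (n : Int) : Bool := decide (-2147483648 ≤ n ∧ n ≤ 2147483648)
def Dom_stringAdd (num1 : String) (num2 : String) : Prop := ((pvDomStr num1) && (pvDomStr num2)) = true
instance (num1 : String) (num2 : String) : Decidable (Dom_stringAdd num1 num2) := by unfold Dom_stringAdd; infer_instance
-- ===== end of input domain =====

-- B replaces A's reverse/pad/column-carry pipeline with integer arithmetic: Horner-evaluate each
-- string to an integer, add once, and re-digitize the sum (objective: alternative); both are total.

-- ===== PORT A =====
-- str[::-1] (the helper reverseString); step -1 never yields none, getD is unreachable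
def reverseStringA (cs : List Char) : List Char :=
  (PySem.List.slice? cs none none (-1)).getD []

def stringAdd (num1 : String) (num2 : String) : String :=
  let add1 := reverseStringA num1.toList
  let add2 := reverseStringA num2.toList
  -- "0"*(k) with k > 0 under the branch: List.replicate is exact there
  let add1' := if add1.length < add2.length then add1 ++ List.replicate (add2.length - add1.length) '0' else add1
  let add2' := if add2.length < add1.length then add2 ++ List.replicate (add1.length - add2.length) '0' else add2
  -- for i in range(0, len(add1)) with state (carry, result); ord("0") = 48
  let st := (PySem.List.pyRange 0 (add1'.length : Int) 1).foldl
    (fun (st : Int × List Char) i =>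
      let digit1 : Int := ((PySem.List.pyGetD add1' i '0').toNat : Int) - 48
      let digit2 : Int := ((PySem.List.pyGetD add2' i '0').toNat : Int) - 48
      let r := digit1 + digit2 + st.1
      (PySem.Int.floordiv r 10, st.2 ++ PySem.Int.toChars (PySem.Int.mod r 10)))
    (0, [])
  let result := if st.1 == 1 then st.2 ++ ['1'] else st.2
  String.ofList (reverseStringA result)

-- ===== PORT B =====
-- the divmod loop 'for _ in range(width): n, d = divmod(n, 10); out.append(str(d))';
-- divisor 10 ≠ 0, so Python's divmod is exactly (floordiv, mod) here
def digitsB : Nat → Int → List (List Char) → Int × List (List Char)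
  | 0, n, out => (n, out)
  | k + 1, n, out =>
      digitsB k (PySem.Int.floordiv n 10) (out ++ [PySem.Int.toChars (PySem.Int.mod n 10)])

def stringAdd_alt (num1 : String) (num2 : String) : String :=
  let v1 := num1.toList.foldl (fun v c => 10 * v + ((c.toNat : Int) - 48)) 0
  let v2 := num2.toList.foldl (fun v c => 10 * v + ((c.toNat : Int) - 48)) 0
  let width := max num1.toList.length num2.toList.length
  -- divmod(v1 + v2, 10 ** width): divisor 10^width ≠ 0
  let carry := PySem.Int.floordiv (v1 + v2) ((10 : Int) ^ width)
  let n0 := PySem.Int.mod (v1 + v2) ((10 : Int) ^ width)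
  let st := digitsB width n0 []
  let out := if carry == 1 then st.2 ++ [['1']] else st.2
  -- "".join(reversed(out)): join with empty separator is flatten
  String.ofList out.reverse.flatten

-- ===== PRECONDITION & SPEC =====
def Spec_stringAdd (num1 : String) (num2 : String) (out : String) : Prop := out = stringAdd_alt num1 num2
instance (num1 : String) (num2 : String) (out : String) : Decidable (Spec_stringAdd num1 num2 out) := by unfold Spec_stringAdd; infer_instance

-- ===== CLAIM (what is proved, stated in full; the proofs are below) =====
def Claim_equal_stringAdd : Prop := ∀ (num1 : String) (num2 : String), Dom_stringAdd num1 num2 → Spec_stringAdd num1 num2 (stringAdd num1 num2)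

-- ===== LEMMAS AND PROOFS =====

def dg (c : Char) : Int := (c.toNat : Int) - 48
def ds (r : Int) : List Char := PySem.Int.toChars (PySem.Int.mod r 10)

theorem ds_len (r : Int) : (ds r).length = 1 := by
  have h10 : (0:Int) < 10 := by norm_num
  have hm : PySem.Int.mod r 10 = r % 10 := PySem.Int.mod_eq_emod_of_pos (by norm_num)
  have h0 : 0 ≤ r % 10 := Int.emod_nonneg r (by norm_num)
  have h1 : r % 10 < 10 := Int.emod_lt_of_pos r h10
  unfold ds
  rw [hm]
  set n := r % 10 with hn
  interval_cases n <;> decide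

-- the common column-addition core: digit chars least-significant first, plus final carry
def core : List Char → List Char → Int → List (List Char) × Int
  | [], [], c => ([], c)
  | x :: xs, y :: ys, c =>
      let r := dg x + dg y + c
      let t := core xs ys (PySem.Int.floordiv r 10)
      (ds r :: t.1, t.2)
  | x :: xs, [], c =>
      let r := dg x + c
      let t := core xs [] (PySem.Int.floordiv r 10)
      (ds r :: t.1, t.2)
  | [], y :: ys, c =>
      let r := dg y + c
      let t := core [] ys (PySem.Int.floordiv r 10)
      (ds r :: t.1, t.2)

-- little-endian value of a digit-char list
def WLE : List Char → Int
  | [] => 0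
  | x :: xs => dg x + 10 * WLE xs

-- little-endian digit groups of v, exactly k of them
def digitsLE : Nat → Int → List (List Char)
  | 0, _ => []
  | k + 1, v => ds v :: digitsLE k (PySem.Int.floordiv v 10)

theorem flatten_reverse_of_singletons : ∀ (L : List (List Char)),
    (∀ g ∈ L, ∃ a, g = [a]) → L.reverse.flatten = L.flatten.reverse := by
  intro L
  induction L with
  | nil => intro _; rfl
  | cons g L ih =>
    intro h
    obtain ⟨a, ha⟩ := h g (by simp)
    simp [ih (fun g hg => h g (by simp [hg])), ha]

theorem digitsLE_singleton : ∀ (k : Nat) (v : Int), ∀ g ∈ digitsLE k v, ∃ a, g = [a] := by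
  intro k
  induction k with
  | zero => intro v g hg; simp [digitsLE] at hg
  | succ k ih =>
    intro v g hg
    simp only [digitsLE, List.mem_cons] at hg
    rcases hg with h | h
    · exact h ▸ List.length_eq_one_iff.mp (ds_len _)
    · exact ih _ g h

theorem reverseStringA_eq (cs : List Char) : reverseStringA cs = cs.reverse := by
  simp [reverseStringA, PySem.List.slice?_none_none_neg_one]

theorem core_nil_comm : ∀ (xs : List Char) (c : Int), core xs [] c = core [] xs c := by
  intro xs
  induction xs with
  | nil => intro c; rfl
  | cons x xs ih => intro c; simp only [core]; rw [ih]

theorem core_comm : ∀ (xs ys : List Char) (c : Int), core xs ys c = core ys xs c := by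
  intro xs
  induction xs with
  | nil =>
    intro ys c
    rw [← core_nil_comm]
  | cons x xs ih =>
    intro ys c
    cases ys with
    | nil => rw [core_nil_comm]
    | cons y ys =>
      simp only [core]
      have hr : dg x + dg y + c = dg y + dg x + c := by ring
      rw [hr, ih]

theorem core_pad : ∀ (xs ys : List Char) (c : Int), ys.length ≤ xs.length →
    core xs (ys ++ List.replicate (xs.length - ys.length) '0') c = core xs ys c := by
  intro xs
  induction xs with
  | nil =>
    intro ys c h
    have : ys = [] := List.eq_nil_of_length_eq_zero (Nat.le_zero.mp h)
    subst this
    rfl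
  | cons x xs ih =>
    intro ys c h
    cases ys with
    | nil =>
      simp only [List.nil_append, List.length_cons, List.length_nil, Nat.sub_zero]
      rw [List.replicate_succ]
      simp only [core]
      have hdg : dg x + dg '0' + c = dg x + c := by
        have : dg '0' = 0 := by decide
        rw [this]; ring
      rw [hdg]
      have := ih [] (PySem.Int.floordiv (dg x + c) 10) (Nat.zero_le _)
      simp only [List.nil_append, List.length_nil, Nat.sub_zero] at this
      rw [this]
    | cons y ys =>
      simp only [List.cons_append, core, List.length_cons]
      have hlen : ys.length ≤ xs.length := by
        simpa using h
      have := ih ys (PySem.Int.floordiv (dg x + dg y + c) 10) hlen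
      rw [Nat.succ_sub_succ]
      rw [this]

theorem fold_range_two (a1 a2 : List Char) (h : a1.length = a2.length) :
    ∀ (n k : Nat), n = a1.length - k → k ≤ a1.length → ∀ (st : Int × List Char),
    (PySem.List.pyRange (k : Int) (a1.length : Int) 1).foldl
      (fun (st : Int × List Char) i =>
        let digit1 : Int := ((PySem.List.pyGetD a1 i '0').toNat : Int) - 48
        let digit2 : Int := ((PySem.List.pyGetD a2 i '0').toNat : Int) - 48
        let r := digit1 + digit2 + st.1
        (PySem.Int.floordiv r 10, st.2 ++ PySem.Int.toChars (PySem.Int.mod r 10))) st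
    = ((a1.drop k).zip (a2.drop k)).foldl
      (fun (st : Int × List Char) p =>
        let r := dg p.1 + dg p.2 + st.1
        (PySem.Int.floordiv r 10, st.2 ++ ds r)) st := by
  intro n
  induction n with
  | zero =>
    intro k hn hk st
    have hk' : k = a1.length := by omega
    rw [hk']
    rw [PySem.List.pyRange_one_eq_nil (by omega)]
    rw [List.drop_length]
    simp
  | succ n ih =>
    intro k hn hk st
    have hklt : k < a1.length := by omega
    have hklt2 : k < a2.length := by omega
    rw [PySem.List.pyRange_one_cons (by exact_mod_cast hklt)]
    rw [List.drop_eq_getElem_cons hklt, List.drop_eq_getElem_cons hklt2]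
    simp only [List.foldl_cons, List.zip_cons_cons]
    have e1 : PySem.List.pyGetD a1 (k : Int) '0' = a1[k] := by
      rw [PySem.List.pyGetD_natCast, List.getD_eq_getElem a1 '0' hklt]
    have e2 : PySem.List.pyGetD a2 (k : Int) '0' = a2[k] := by
      rw [PySem.List.pyGetD_natCast, List.getD_eq_getElem a2 '0' hklt2]
    rw [e1, e2]
    have hcast : ((k : Int) + 1) = ((k + 1 : Nat) : Int) := by push_cast; ring
    rw [hcast]
    exact ih (k + 1) (by omega) (by omega) _

theorem foldA_eq : ∀ (xs ys : List Char), xs.length = ys.length → ∀ (c : Int) (acc : List Char),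
    (xs.zip ys).foldl
      (fun (st : Int × List Char) p =>
        let r := dg p.1 + dg p.2 + st.1
        (PySem.Int.floordiv r 10, st.2 ++ ds r)) (c, acc)
    = ((core xs ys c).2, acc ++ (core xs ys c).1.flatten) := by
  intro xs
  induction xs with
  | nil =>
    intro ys h0 c acc
    cases ys with
    | nil => simp [core]
    | cons y ys => simp at h0
  | cons x xs ih =>
    intro ys hlen c acc
    cases ys with
    | nil => simp at hlen
    | cons y ys =>
      simp only [List.zip_cons_cons, List.foldl_cons, core]
      have hlen' : xs.length = ys.length := by simpa using hlen
      rw [ih ys hlen']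
      simp [List.append_assoc]

theorem stringAdd_chars (num1 num2 : String) :
    stringAdd num1 num2 = String.ofList
      (if (core num1.toList.reverse num2.toList.reverse 0).2 == 1
       then '1' :: (core num1.toList.reverse num2.toList.reverse 0).1.flatten.reverse
       else (core num1.toList.reverse num2.toList.reverse 0).1.flatten.reverse) := by
  unfold stringAdd
  simp only [reverseStringA_eq]
  have hsing : ∀ (R1 R2 : List Char) (c : Int), ∀ g ∈ (core R1 R2 c).1, ∃ a, g = [a] := by
    intro R1
    induction R1 with
    | nil =>
      intro R2
      induction R2 with
      | nil => intro c g hg; simp [core] at hg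
      | cons y ys ihy =>
        intro c g hg
        simp only [core, List.mem_cons] at hg
        rcases hg with h | h
        · exact h ▸ List.length_eq_one_iff.mp (ds_len _)
        · exact ihy _ g h
    | cons x xs ihx =>
      intro R2 c g hg
      cases R2 with
      | nil =>
        simp only [core, List.mem_cons] at hg
        rcases hg with h | h
        · exact h ▸ List.length_eq_one_iff.mp (ds_len _)
        · exact ihx [] _ g h
      | cons y ys =>
        simp only [core, List.mem_cons] at hg
        rcases hg with h | h
        · exact h ▸ List.length_eq_one_iff.mp (ds_len _)
        · exact ihx ys _ g h
  generalize num1.toList.reverse = R1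
  generalize num2.toList.reverse = R2
  by_cases h1 : R1.length < R2.length
  · have h1' : ¬ (R2.length < R1.length) := by omega
    rw [if_pos h1, if_neg h1']
    have hlen : (R1 ++ List.replicate (R2.length - R1.length) '0').length = R2.length := by
      simp; omega
    have key := fold_range_two (R1 ++ List.replicate (R2.length - R1.length) '0') R2
      (by rw [hlen]) (R1 ++ List.replicate (R2.length - R1.length) '0').length 0 (by omega)
      (by omega) (0, [])
    simp only [Nat.cast_zero, List.drop_zero] at key
    rw [key, foldA_eq _ _ (by rw [hlen]) 0 []]
    have hc : core (R1 ++ List.replicate (R2.length - R1.length) '0') R2 0 = core R1 R2 0 := by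
      rw [core_comm, core_pad R2 R1 0 (by omega), core_comm]
    rw [hc]
    cases hb : ((core R1 R2 0).2 == 1) <;> simp [hb]
  · by_cases h2 : R2.length < R1.length
    · rw [if_neg h1, if_pos h2]
      have hlen : R1.length = (R2 ++ List.replicate (R1.length - R2.length) '0').length := by
        simp; omega
      have key := fold_range_two R1 (R2 ++ List.replicate (R1.length - R2.length) '0')
        hlen R1.length 0 (by omega) (by omega) (0, [])
      simp only [Nat.cast_zero, List.drop_zero] at key
      rw [key, foldA_eq _ _ hlen 0 []]
      have hc : core R1 (R2 ++ List.replicate (R1.length - R2.length) '0') 0 = core R1 R2 0 :=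
        core_pad R1 R2 0 (by omega)
      rw [hc]
      cases hb : ((core R1 R2 0).2 == 1) <;> simp [hb]
    · rw [if_neg h1, if_neg h2]
      have hlen : R1.length = R2.length := by omega
      have key := fold_range_two R1 R2 hlen R1.length 0 (by omega) (by omega) (0, [])
      simp only [Nat.cast_zero, List.drop_zero] at key
      rw [key, foldA_eq _ _ hlen 0 []]
      cases hb : ((core R1 R2 0).2 == 1) <;> simp [hb]

-- arithmetic of one column step: splitting v = r + 10*R
theorem step_mod (r R : Int) : PySem.Int.mod (r + 10 * R) 10 = PySem.Int.mod r 10 := by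
  rw [PySem.Int.mod_eq_emod_of_pos (by norm_num), PySem.Int.mod_eq_emod_of_pos (by norm_num)]
  exact Int.add_mul_emod_self_left r 10 R

theorem step_div (r R : Int) :
    PySem.Int.floordiv (r + 10 * R) 10 = R + PySem.Int.floordiv r 10 := by
  rw [PySem.Int.floordiv_eq_ediv_of_pos (by norm_num), PySem.Int.floordiv_eq_ediv_of_pos (by norm_num)]
  rw [Int.add_mul_ediv_left r R (by norm_num)]
  ring

theorem pow_div_step (v : Int) (L : Nat) :
    PySem.Int.floordiv v ((10 : Int) ^ (L + 1))
      = PySem.Int.floordiv (PySem.Int.floordiv v 10) ((10 : Int) ^ L) := by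
  have hp : (0 : Int) < 10 ^ L := by positivity
  have hp1 : (0 : Int) < 10 ^ (L + 1) := by positivity
  rw [PySem.Int.floordiv_eq_ediv_of_pos hp1, PySem.Int.floordiv_eq_ediv_of_pos hp,
    PySem.Int.floordiv_eq_ediv_of_pos (by norm_num : (0:Int) < 10)]
  rw [Int.ediv_ediv_of_nonneg (by norm_num : (0:Int) ≤ 10)]
  congr 1
  rw [pow_succ]
  ring

-- splitting v = r + 10*R through digitsLE and the final quotient
theorem digitsLE_split (r R : Int) (L : Nat) :
    digitsLE (L + 1) (r + 10 * R) = ds r :: digitsLE L (R + PySem.Int.floordiv r 10) := by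
  simp only [digitsLE]
  rw [show ds (r + 10 * R) = ds r from by unfold ds; rw [step_mod], step_div]

theorem carry_split (r R : Int) (L : Nat) :
    PySem.Int.floordiv (r + 10 * R) ((10 : Int) ^ (L + 1))
      = PySem.Int.floordiv (R + PySem.Int.floordiv r 10) ((10 : Int) ^ L) := by
  rw [pow_div_step, step_div]

-- core computes the little-endian digits of WLE xs + WLE ys + c and its quotient by 10^L
theorem core_eq_digits : ∀ (xs ys : List Char) (c : Int),
    core xs ys c = (digitsLE (max xs.length ys.length) (WLE xs + WLE ys + c),
      PySem.Int.floordiv (WLE xs + WLE ys + c) ((10 : Int) ^ (max xs.length ys.length))) := by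
  intro xs
  induction xs with
  | nil =>
    intro ys
    induction ys with
    | nil =>
      intro c
      simp only [core, WLE, List.length_nil, Nat.max_self, digitsLE, pow_zero]
      rw [PySem.Int.floordiv_eq_ediv_of_pos (by norm_num : (0:Int) < 1), Int.ediv_one]
      norm_num
    | cons y ys ihy =>
      intro c
      simp only [core, List.length_nil, List.length_cons, Nat.zero_max]
      rw [ihy]
      have hv : WLE ([] : List Char) + WLE (y :: ys) + c = (dg y + c) + 10 * WLE ys := by
        simp only [WLE]; ring
      rw [hv, digitsLE_split, carry_split]
      have ha : WLE ([] : List Char) + WLE ys + PySem.Int.floordiv (dg y + c) 10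
          = WLE ys + PySem.Int.floordiv (dg y + c) 10 := by simp only [WLE]; ring
      rw [ha]
      simp [Nat.zero_max]
  | cons x xs ihx =>
    intro ys c
    cases ys with
    | nil =>
      simp only [core, List.length_nil, List.length_cons, Nat.max_zero]
      rw [ihx []]
      have hv : WLE (x :: xs) + WLE ([] : List Char) + c = (dg x + c) + 10 * WLE xs := by
        simp only [WLE]; ring
      rw [hv, digitsLE_split, carry_split]
      have ha : WLE xs + WLE ([] : List Char) + PySem.Int.floordiv (dg x + c) 10
          = WLE xs + PySem.Int.floordiv (dg x + c) 10 := by simp only [WLE]; ring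
      rw [ha]
      simp [Nat.max_zero]
    | cons y ys =>
      simp only [core, List.length_cons]
      have hmax : max (xs.length + 1) (ys.length + 1) = max xs.length ys.length + 1 := by omega
      have hv : WLE (x :: xs) + WLE (y :: ys) + c
          = (dg x + dg y + c) + 10 * (WLE xs + WLE ys) := by simp only [WLE]; ring
      rw [hmax, hv, digitsLE_split, carry_split, ihx ys]

-- B-side: the divmod loop appends exactly the little-endian digit groups
theorem digitsB_snd : ∀ (k : Nat) (n : Int) (out : List (List Char)),
    (digitsB k n out).2 = out ++ digitsLE k n := by
  intro k
  induction k with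
  | zero => intro n out; simp [digitsB, digitsLE]
  | succ k ih =>
    intro n out
    simp only [digitsB]
    rw [ih]
    simp [digitsLE, ds, List.append_assoc]

theorem mod_ten_of_mod_pow (v : Int) (L : Nat) :
    PySem.Int.mod (PySem.Int.mod v ((10 : Int) ^ (L + 1))) 10 = PySem.Int.mod v 10 := by
  have hp : (0 : Int) < 10 ^ (L + 1) := by positivity
  rw [PySem.Int.mod_eq_emod_of_pos hp, PySem.Int.mod_eq_emod_of_pos (by norm_num : (0:Int) < 10),
    PySem.Int.mod_eq_emod_of_pos (by norm_num : (0:Int) < 10)]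
  exact Int.emod_emod_of_dvd v ⟨10 ^ L, by rw [pow_succ]; ring⟩

theorem emod_pow_div (v : Int) (L : Nat) :
    PySem.Int.floordiv (PySem.Int.mod v ((10 : Int) ^ (L + 1))) 10
      = PySem.Int.mod (PySem.Int.floordiv v 10) ((10 : Int) ^ L) := by
  have hp : (0 : Int) < 10 ^ L := by positivity
  have hp1 : (0 : Int) < 10 ^ (L + 1) := by positivity
  rw [PySem.Int.mod_eq_emod_of_pos hp1, PySem.Int.mod_eq_emod_of_pos hp,
    PySem.Int.floordiv_eq_ediv_of_pos (by norm_num : (0:Int) < 10),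
    PySem.Int.floordiv_eq_ediv_of_pos (by norm_num : (0:Int) < 10)]
  have h1 : v % 10 ^ (L + 1) = v + 10 * (-(10 ^ L * (v / 10 ^ (L + 1)))) := by
    rw [Int.emod_def, pow_succ]; ring
  rw [h1, Int.add_mul_ediv_left v _ (by norm_num : (10:Int) ≠ 0)]
  have h2 : v / 10 / 10 ^ L = v / 10 ^ (L + 1) := by
    rw [Int.ediv_ediv_of_nonneg (by norm_num : (0:Int) ≤ 10)]
    congr 1
    rw [pow_succ]; ring
  rw [Int.emod_def, h2]
  ring

theorem digitsLE_mod : ∀ (L : Nat) (v : Int),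
    digitsLE L (PySem.Int.mod v ((10 : Int) ^ L)) = digitsLE L v := by
  intro L
  induction L with
  | zero => intro v; rfl
  | succ L ih =>
    intro v
    simp only [digitsLE]
    congr 1
    · unfold ds; rw [mod_ten_of_mod_pow]
    · rw [emod_pow_div]; exact ih (PySem.Int.floordiv v 10)

-- Horner evaluation equals the little-endian value of the reversed string
theorem WLE_append (l : List Char) (x : Char) :
    WLE (l ++ [x]) = WLE l + dg x * 10 ^ l.length := by
  induction l with
  | nil => simp [WLE]
  | cons y l ih =>
    simp only [List.cons_append, WLE, ih, List.length_cons, pow_succ]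
    ring

theorem horner_acc : ∀ (cs : List Char) (acc : Int),
    cs.foldl (fun v c => 10 * v + ((c.toNat : Int) - 48)) acc
      = acc * 10 ^ cs.length + WLE cs.reverse := by
  intro cs
  induction cs with
  | nil => intro acc; simp [WLE]
  | cons x xs ih =>
    intro acc
    simp only [List.foldl_cons, List.reverse_cons, List.length_cons]
    rw [ih, WLE_append]
    simp only [List.length_reverse, pow_succ]
    show (10 * acc + dg x) * 10 ^ xs.length + WLE xs.reverse
      = acc * (10 ^ xs.length * 10) + (WLE xs.reverse + dg x * 10 ^ xs.length)
    ring

theorem stringAdd_alt_chars (num1 num2 : String) :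
    stringAdd_alt num1 num2 = String.ofList
      (if (core num1.toList.reverse num2.toList.reverse 0).2 == 1
       then '1' :: (core num1.toList.reverse num2.toList.reverse 0).1.flatten.reverse
       else (core num1.toList.reverse num2.toList.reverse 0).1.flatten.reverse) := by
  have hcore := core_eq_digits num1.toList.reverse num2.toList.reverse 0
  rw [add_zero] at hcore
  simp only [List.length_reverse] at hcore
  unfold stringAdd_alt
  simp only []
  rw [horner_acc, horner_acc]
  simp only [zero_mul, zero_add]
  rw [digitsB_snd, List.nil_append, digitsLE_mod, hcore]
  have hrev : ∀ (k : Nat), (digitsLE k (WLE num1.toList.reverse + WLE num2.toList.reverse)).reverse.flatten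
      = (digitsLE k (WLE num1.toList.reverse + WLE num2.toList.reverse)).flatten.reverse :=
    fun k => flatten_reverse_of_singletons _ (digitsLE_singleton k _)
  cases hb : (PySem.Int.floordiv (WLE num1.toList.reverse + WLE num2.toList.reverse)
      ((10 : Int) ^ (max num1.toList.length num2.toList.length)) == 1) <;>
    simp [hb, List.reverse_append, hrev]

theorem stringAdd_eq_alt (num1 num2 : String) : stringAdd num1 num2 = stringAdd_alt num1 num2 := by
  rw [stringAdd_chars, stringAdd_alt_chars]

-- ===== VERDICT (by name: the statement is the Claim_ definition above) =====
theorem stringAdd_spec : Claim_equal_stringAdd := by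
  intro num1 num2 _
  unfold Spec_stringAdd
  exact stringAdd_eq_alt num1 num2
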